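-- pv_equiv track=rewrite | github.com/qianzii2/Z1DB | server/sql_splitter.py | has_real_content
-- ===== SOURCE A (Python) =====
-- def has_real_content(stmt: str) -> bool:
--     """检查语句是否有实际内容（非空白/注释/分号）。"""
--     i = 0
--     while i < len(stmt):
--         ch = stmt[i]
--         if ch.isspace() or ch == ';':
--             i += 1; continue
--         if ch == '-' and i + 1 < len(stmt) and stmt[i + 1] == '-':
--             while i < len(stmt) and stmt[i] != '\n': i += 1
--             continue
--         if ch == '/' and i + 1 < len(stmt) and stmt[i + 1] == '*':
--             i += 2; d = 1
--             while i < len(stmt) and d > 0: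
--                 if stmt[i] == '/' and i + 1 < len(stmt) and stmt[i + 1] == '*':
--                     d += 1; i += 1
--                 elif stmt[i] == '*' and i + 1 < len(stmt) and stmt[i + 1] == '/':
--                     d -= 1; i += 1
--                 i += 1
--             continue
--         return True
--     return False
-- ===== SOURCE B (Python) =====
-- def _skip_line_comment(s, i):
--     """Return the index just past the next newline (or len(s))."""
--     while i < len(s):
--         if s[i] == '\n':
--             return i + 1
--         i += 1
--     return i
--
--
-- def _skip_block_comment(s, i):
--     """s[i:i+2] == '/*'; return the index just past the matching '*/'
--     (handling nesting by recursion), or len(s) if unterminated."""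
--     i += 2
--     while i < len(s):
--         if s[i] == '/' and i + 1 < len(s) and s[i + 1] == '*':
--             i = _skip_block_comment(s, i)
--         elif s[i] == '*' and i + 1 < len(s) and s[i + 1] == '/':
--             return i + 2
--         else:
--             i += 1
--     return i
--
--
-- def has_real_content(stmt: str) -> bool:
--     i = 0
--     while i < len(stmt):
--         ch = stmt[i]
--         if ch.isspace() or ch == ';':
--             i += 1
--         elif ch == '-' and i + 1 < len(stmt) and stmt[i + 1] == '-':
--             i = _skip_line_comment(stmt, i + 2)
--         elif ch == '/' and i + 1 < len(stmt) and stmt[i + 1] == '*':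
--             i = _skip_block_comment(stmt, i)
--         else:
--             return True
--     return False
-- ===== Notes on version B (the rewrite author's own statement) =====
-- stated objective: alternative
-- what changed: Replaced A's inlined depth-counter scanner for nested block comments with a driver plus two skip-helpers: a recursive _skip_block_comment (calling itself on each inner '/*') and a _skip_line_comment that consumes through the newline.
import Mathlib
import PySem

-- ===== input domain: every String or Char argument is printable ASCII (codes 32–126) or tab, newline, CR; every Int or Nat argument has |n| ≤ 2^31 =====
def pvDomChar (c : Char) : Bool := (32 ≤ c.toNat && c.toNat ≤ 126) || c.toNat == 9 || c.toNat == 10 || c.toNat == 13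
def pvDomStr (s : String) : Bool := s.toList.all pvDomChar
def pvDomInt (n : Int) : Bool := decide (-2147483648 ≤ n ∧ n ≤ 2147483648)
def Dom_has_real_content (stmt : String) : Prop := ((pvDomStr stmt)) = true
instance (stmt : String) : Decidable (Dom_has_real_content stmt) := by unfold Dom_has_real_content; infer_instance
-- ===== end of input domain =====

-- B restructures A's inlined depth-counter scanner into a driver plus recursive skip-helpers; return value proved equal (objective: alternative decomposition).

-- ===== PORT A =====
-- inner `while i < len(stmt) and stmt[i] != '\n'` loop: returns the suffix starting at the first '\n' (or [])
def alineA : List Char → List Char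
  | [] => []
  | c :: t => if c == '\n' then c :: t else alineA t

-- inner block-comment loop: state is the remaining suffix and the depth d; exits when d = 0 or the string ends
def ablockA : List Char → Nat → List Char
  | l, 0 => l
  | [], _ + 1 => []
  | '/' :: '*' :: t, d + 1 => ablockA t (d + 2)   -- d += 1; i += 1; i += 1
  | '*' :: '/' :: t, d + 1 => ablockA t d         -- d -= 1; i += 1; i += 1
  | _ :: t, d + 1 => ablockA t (d + 1)            -- i += 1
termination_by l _ => l.length

theorem alineA_length : ∀ l : List Char, (alineA l).length ≤ l.length := by
  intro l; induction l with
  | nil => simp [alineA]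
  | cons c t ih => simp only [alineA]; split; · simp
                   · simp <;> omega

theorem ablockA_length : ∀ (l : List Char) (d : Nat), (ablockA l d).length ≤ l.length := by
  intro l d
  induction l, d using ablockA.induct <;> simp_all [ablockA] <;> omega

-- outer while loop of A over the remaining suffix
def aLoop : List Char → Bool
  | [] => false
  | c :: t =>
    if PySem.Chars.isspace c || c == ';' then aLoop t
    else if c == '-' && t.head? == some '-' then aLoop (alineA (c :: t))
    else if c == '/' && t.head? == some '*' then aLoop (ablockA t.tail 1)
    else true
termination_by l => l.length
decreasing_by
  · simp <;> omega
  · -- c = '-', so alineA (c :: t) = alineA t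
    rename_i h1 h2
    simp at h2
    simp [alineA, h2.1]
    have := alineA_length t; omega
  · have := ablockA_length t.tail 1
    have ht : t.tail.length ≤ t.length := by cases t <;> simp
    simp <;> omega

def has_real_content (stmt : String) : Bool := aLoop stmt.toList

-- ===== PORT B =====
-- _skip_line_comment: consume up to and including the next '\n'
def blineB : List Char → List Char
  | [] => []
  | c :: t => if c == '\n' then t else blineB t

-- _skip_block_comment: argument is the suffix after '/*'; returns the suffix after the matching '*/'
-- (recursing into itself on an inner '/*'), carrying the length bound needed for termination
def bblockB : (l : List Char) → { r : List Char // r.length ≤ l.length }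
  | [] => ⟨[], le_refl _⟩
  | '/' :: '*' :: t =>
    let inner := bblockB t
    let outer := bblockB inner.val
    ⟨outer.val, le_trans (le_trans outer.property inner.property) (by simp <;> omega)⟩
  | '*' :: '/' :: t => ⟨t, by simp <;> omega⟩
  | _ :: t => ⟨(bblockB t).val, by have := (bblockB t).property; simp <;> omega⟩
termination_by l => l.length
decreasing_by
  all_goals simp_wf
  · exact Nat.le_succ_of_le inner.2
  · exact Nat.le_succ_of_le inner.2

theorem blineB_length : ∀ l : List Char, (blineB l).length ≤ l.length := by
  intro l; induction l with
  | nil => simp [blineB]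
  | cons c t ih => simp only [blineB]; split; · simp
                   · simp <;> omega

-- driver loop of B
def bLoop : List Char → Bool
  | [] => false
  | c :: t =>
    if PySem.Chars.isspace c || c == ';' then bLoop t
    else if c == '-' && t.head? == some '-' then bLoop (blineB t.tail)
    else if c == '/' && t.head? == some '*' then bLoop ((bblockB t.tail).val)
    else true
termination_by l => l.length
decreasing_by
  · simp <;> omega
  · have ht : t.tail.length ≤ t.length := by cases t <;> simp
    have := blineB_length t.tail
    simp <;> omega
  · have ht : t.tail.length ≤ t.length := by cases t <;> simp
    have := (bblockB t.tail).property
    simp <;> omega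

def has_real_content_alt (stmt : String) : Bool := bLoop stmt.toList

-- ===== PRECONDITION & SPEC =====
def Spec_has_real_content (stmt : String) (out : Bool) : Prop := out = has_real_content_alt stmt
instance (stmt : String) (out : Bool) : Decidable (Spec_has_real_content stmt out) := by unfold Spec_has_real_content; infer_instance

-- ===== CLAIM (what is proved, stated in full; the proofs are below) =====
def Claim_equal_has_real_content : Prop := ∀ (stmt : String), Dom_has_real_content stmt → Spec_has_real_content stmt (has_real_content stmt)

-- ===== LEMMAS AND PROOFS =====

-- A's depth counter and B's recursion agree: scanning at depth d+1 is one recursive skip followed by depth d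
theorem block_agree : ∀ (l : List Char) (d : Nat), ablockA l (d + 1) = ablockA (bblockB l).val d := by
  intro l
  induction l using bblockB.induct with
  | case1 => intro d; cases d <;> simp [ablockA, bblockB]
  | case2 t innr ihT ihI ihB =>
    intro d
    have h1 : ablockA ('/' :: '*' :: t) (d + 1) = ablockA t (d + 2) := by simp [ablockA]
    have h2 : (bblockB ('/' :: '*' :: t)).val = (bblockB (bblockB t).val).val := by
      simp [bblockB]
    rw [h1, h2]
    rw [ihT (d + 1), ihI d]
  | case3 t =>
    intro d
    have h1 : ablockA ('*' :: '/' :: t) (d + 1) = ablockA t d := by simp [ablockA]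
    have h2 : (bblockB ('*' :: '/' :: t)).val = t := by simp [bblockB]
    rw [h1, h2]
  | case4 c t hn1 hn2 ih =>
    intro d
    have h1 : ablockA (c :: t) (d + 1) = ablockA t (d + 1) := ablockA.eq_5 c t d hn1 hn2
    have h2 : (bblockB (c :: t)).val = (bblockB t).val := by rw [bblockB.eq_4 c t hn1 hn2]
    rw [h1, h2, ih d]

theorem line_agree : ∀ l : List Char, (alineA l = [] ∧ blineB l = []) ∨ alineA l = '\n' :: blineB l := by
  intro l; induction l with
  | nil => left; simp [alineA, blineB]
  | cons c t ih =>
    by_cases h : c = '\n'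
    · right; subst h; simp [alineA, blineB]
    · simp only [alineA, blineB]
      rw [if_neg (by simp [h]), if_neg (by simp [h])]
      exact ih

theorem loops_agree : ∀ (n : Nat) (l : List Char), l.length ≤ n → aLoop l = bLoop l := by
  intro n
  induction n with
  | zero =>
    intro l hl
    have : l = [] := by cases l <;> simp_all
    subst this; simp [aLoop, bLoop]
  | succ n ih =>
    intro l hl
    match l with
    | [] => simp [aLoop, bLoop]
    | c :: t =>
      have hlen : t.length ≤ n := by simp at hl; omega
      rw [aLoop, bLoop]
      by_cases hs : (PySem.Chars.isspace c || c == ';') = true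
      · rw [if_pos hs, if_pos hs]; exact ih t hlen
      · rw [if_neg hs, if_neg hs]
        by_cases hd : (c == '-' && t.head? == some '-') = true
        · rw [if_pos hd, if_pos hd]
          obtain ⟨rfl, t2, rfl⟩ : c = '-' ∧ ∃ t2, t = '-' :: t2 := by
            cases t <;> simp_all
          simp only [List.tail_cons]
          have ha : alineA ('-' :: '-' :: t2) = alineA t2 := by simp [alineA]
          rw [ha]
          rcases line_agree t2 with ⟨h1, h2⟩ | h1
          · rw [h1, h2]; simp [aLoop, bLoop]
          · rw [h1]
            have hnl : aLoop ('\n' :: blineB t2) = aLoop (blineB t2) := by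
              rw [aLoop]; rw [if_pos (by decide)]
            rw [hnl]
            exact ih _ (le_trans (blineB_length t2) (by simp at hl; omega))
        · rw [if_neg hd, if_neg hd]
          by_cases hb : (c == '/' && t.head? == some '*') = true
          · rw [if_pos hb, if_pos hb]
            obtain ⟨rfl, t2, rfl⟩ : c = '/' ∧ ∃ t2, t = '*' :: t2 := by
              cases t <;> simp_all
            simp only [List.tail_cons]
            have h0 : ablockA t2 1 = ablockA (bblockB t2).val 0 := block_agree t2 0
            have h00 : ablockA (bblockB t2).val 0 = (bblockB t2).val := by
              rw [ablockA.eq_def]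
            rw [h0, h00]
            exact ih _ (le_trans (bblockB t2).property (by simp at hl; omega))
          · rw [if_neg hb, if_neg hb]

-- ===== VERDICT (by name: the statement is the Claim_ definition above) =====
theorem has_real_content_spec : Claim_equal_has_real_content := by
  intro stmt _
  unfold Spec_has_real_content has_real_content has_real_content_alt
  exact loops_agree stmt.toList.length stmt.toList (le_refl _)
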